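-- pv_equiv track=rewrite | github.com/Olle7/uldistatud-tehtem-rgi-funktsioon | aTXb/aTXb II.py | leia_sulgude_siseseim_avaldis
-- ===== SOURCE A (Python) =====
-- def leia_sulgude_siseseim_avaldis(avaldis):
--     s=0
--     s_max=0
--     Sid=[]
--     sulgude_siseseim_avaldis=""
--     for mark in(list(avaldis)):
--         if mark =="(":#kui vaadeldav tähemärk on "(",siis sulgude sisesus +=1
--             s+=1
--         elif mark ==")":#kui vaadeldav tähemärk on "(",siis sulgude sisesus +=-1
--             s+=-1
--         Sid.append(s)#lisa kõikide märkide sulgude sisesus arv hulka Sid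
--     for indeks in range(Sid.index(max(Sid))+1,Sid.index(max(Sid))+Sid.count(max(Sid)),1):#maksimaalseste sulusisesustega tähtede indeksid
--         sulgude_siseseim_avaldis+=list(avaldis)[indeks]#vastava indeksiga täht liida avaldisse
--     return(sulgude_siseseim_avaldis)
-- ===== SOURCE B (Python) =====
-- def leia_sulgude_siseseim_avaldis(avaldis):
--     # One pass: track depth, the running maximum depth, its first index and its count,
--     # then return the slice right after the first maximum-depth position.
--     s = 0
--     m = None
--     first = 0
--     cnt = 0
--     for i, ch in enumerate(avaldis):
--         if ch == "(":
--             s += 1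
--         elif ch == ")":
--             s -= 1
--         if m is None or s > m:
--             m = s
--             first = i
--             cnt = 1
--         elif s == m:
--             cnt += 1
--     if m is None:
--         return ""
--     return avaldis[first + 1 : first + cnt]
-- ===== Notes on version B (the rewrite author's own statement) =====
-- stated objective: faster
-- what changed: B replaces A's post-hoc max/index/count scans and the per-iteration list(avaldis) rebuild inside the index loop with a single pass that tracks depth, running maximum, its first index and its count, followed by one slice.
import Mathlib
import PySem

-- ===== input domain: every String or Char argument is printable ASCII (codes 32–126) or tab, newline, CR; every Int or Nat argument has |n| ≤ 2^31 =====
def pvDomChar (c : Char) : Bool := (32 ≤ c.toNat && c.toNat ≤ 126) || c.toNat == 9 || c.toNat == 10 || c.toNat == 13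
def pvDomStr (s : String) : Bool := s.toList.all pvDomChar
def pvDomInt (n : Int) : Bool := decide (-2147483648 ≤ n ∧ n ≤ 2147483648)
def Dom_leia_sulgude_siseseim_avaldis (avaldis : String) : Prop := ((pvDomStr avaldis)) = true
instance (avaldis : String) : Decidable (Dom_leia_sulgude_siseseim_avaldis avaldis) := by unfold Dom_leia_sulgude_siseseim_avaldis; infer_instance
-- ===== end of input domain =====

-- B replaces A's quadratic post-hoc max/index/count scans (and per-iteration list rebuild)
-- with one linear pass tracking depth, running maximum, its first index and count, then one slice.

-- depth update for one character (shared by both ports: both Pythons use the same if/elif)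
def pvUpd (s : Int) (mark : Char) : Int :=
  if mark = '(' then s + 1 else if mark = ')' then s - 1 else s

-- ===== PORT A =====
-- loop body of A's first loop: s update + Sid.append(s)
def pvAStep (st : Int × List Int) (mark : Char) : Int × List Int :=
  let s := pvUpd st.1 mark
  (s, st.2 ++ [s])

def leia_sulgude_siseseim_avaldis (avaldis : String) : String :=
  let chars := avaldis.toList
  let st := chars.foldl pvAStep (0, [])
  let Sid := st.2
  match PySem.List.max? Sid (fun x => x) with
  | none => ""   -- Python raises ValueError here (only for the empty string); excluded by Pre_
  | some m =>
    let i : Nat := (PySem.List.index? Sid m).getD 0   -- some, since m ∈ Sid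
    let cnt : Nat := PySem.List.count Sid m
    let res := (PySem.List.pyRange ((i : Int) + 1) ((i : Int) + (cnt : Int)) 1).foldl
      (fun acc idx =>
        match PySem.List.pyGet? chars idx with   -- in range for every generated index
        | some c => acc ++ [c]
        | none => acc) ([] : List Char)
    String.ofList res

-- ===== PORT B =====
-- loop body of B's single pass: state = (depth, None | (max depth, its first index, its count))
def pvBStep (st : Int × Option (Int × Int × Int)) (p : Int × Char) : Int × Option (Int × Int × Int) :=
  let s := pvUpd st.1 p.2
  match st.2 with
  | none => (s, some (s, p.1, 1))
  | some (m, first, cnt) =>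
    if s > m then (s, some (s, p.1, 1))
    else if s = m then (s, some (m, first, cnt + 1))
    else (s, some (m, first, cnt))

def leia_sulgude_siseseim_avaldis_alt (avaldis : String) : String :=
  let chars := avaldis.toList
  let st := (PySem.List.enumerate chars 0).foldl pvBStep (0, none)
  match st.2 with
  | none => ""
  | some (_, first, cnt) =>
    String.ofList (PySem.List.slice chars (some (first + 1)) (some (first + cnt)))

-- ===== PRECONDITION & SPEC =====
-- Pre_ excludes only the empty string, on which A raises ValueError (max of an empty list).
def Pre_leia_sulgude_siseseim_avaldis (avaldis : String) : Prop := avaldis.toList ≠ []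
instance (avaldis : String) : Decidable (Pre_leia_sulgude_siseseim_avaldis avaldis) := by
  unfold Pre_leia_sulgude_siseseim_avaldis; infer_instance
def pvWitness_leia_sulgude_siseseim_avaldis : String := "a+(b*(c-d))"

def Spec_leia_sulgude_siseseim_avaldis (avaldis : String) (out : String) : Prop :=
  out = leia_sulgude_siseseim_avaldis_alt avaldis
instance (avaldis : String) (out : String) : Decidable (Spec_leia_sulgude_siseseim_avaldis avaldis out) := by
  unfold Spec_leia_sulgude_siseseim_avaldis; infer_instance

-- ===== CLAIM (what is proved, stated in full; the proofs are below) =====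
def Claim_equal_leia_sulgude_siseseim_avaldis : Prop :=
  ∀ (avaldis : String), Dom_leia_sulgude_siseseim_avaldis avaldis →
    Pre_leia_sulgude_siseseim_avaldis avaldis →
    Spec_leia_sulgude_siseseim_avaldis avaldis (leia_sulgude_siseseim_avaldis avaldis)
-- ===== LEMMAS AND PROOFS =====

-- the depth sequence of cs starting from depth s (A's Sid, abstractly)
def pvDepths : List Char → Int → List Int
  | [], _ => []
  | c :: cs, s => pvUpd s c :: pvDepths cs (pvUpd s c)

-- the final depth
def pvLast : List Char → Int → Int
  | [], s => s
  | c :: cs, s => pvLast cs (pvUpd s c)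

-- max / first index / count of the maximum, as total Int-valued functions
def pvM (L : List Int) : Int := (PySem.List.max? L (fun x => x)).getD 0
def pvF (L : List Int) : Int := (((PySem.List.index? L (pvM L)).getD 0 : Nat) : Int)
def pvC (L : List Int) : Int := ((PySem.List.count L (pvM L) : Nat) : Int)

lemma pvAFold (cs : List Char) : ∀ (s : Int) (acc : List Int),
    cs.foldl pvAStep (s, acc) = (pvLast cs s, acc ++ pvDepths cs s) := by
  induction cs with
  | nil => intro s acc; simp [pvLast, pvDepths]
  | cons c cs ih =>
    intro s acc
    simp only [List.foldl_cons, pvAStep, pvDepths, pvLast, ih]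
    simp

lemma pvM_cons (x : Int) (t : List Int) : pvM (x :: t) = t.foldl max x := by
  simp [pvM, PySem.List.max?_id_cons]

lemma pvMax?_eq {L : List Int} (h : L ≠ []) :
    PySem.List.max? L (fun x => x) = some (pvM L) := by
  cases L with
  | nil => exact absurd rfl h
  | cons x t => rw [pvM_cons, PySem.List.max?_id_cons]

lemma pvM_mem {L : List Int} (h : L ≠ []) : pvM L ∈ L :=
  PySem.List.max?_mem (pvMax?_eq h)

lemma pvM_isMax {L : List Int} (h : L ≠ []) : ∀ y ∈ L, y ≤ pvM L :=
  PySem.List.max?_isMax (pvMax?_eq h)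

lemma pvM_append {L : List Int} (h : L ≠ []) (x : Int) :
    pvM (L ++ [x]) = if pvM L < x then x else pvM L := by
  have hmax : pvM (L ++ [x]) = max (pvM L) x := by
    cases L with
    | nil => exact absurd rfl h
    | cons p t => simp [pvM_cons, List.foldl_append]
  rw [hmax]
  split
  · next h1 => exact max_eq_right h1.le
  · next h1 => exact max_eq_left (not_lt.mp h1)

lemma pvF_append {L : List Int} (h : L ≠ []) (x : Int) :
    pvF (L ++ [x]) = if pvM L < x then (L.length : Int) else pvF L := by
  have hm := pvM_append h x
  split
  · next hlt =>
    have hmax : pvM (L ++ [x]) = x := by rw [hm]; simp [hlt]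
    have hnot : x ∉ L := fun hx => absurd (pvM_isMax h x hx) (not_le.mpr hlt)
    unfold pvF
    rw [hmax, PySem.List.index?_append_singleton_self L x hnot]
    simp
  · next hge =>
    have hmax : pvM (L ++ [x]) = pvM L := by rw [hm]; simp [hge]
    unfold pvF
    rw [hmax, PySem.List.index?_append_of_mem [x] (pvM_mem h)]

lemma pvC_append {L : List Int} (h : L ≠ []) (x : Int) :
    pvC (L ++ [x]) =
      if pvM L < x then 1 else if x = pvM L then pvC L + 1 else pvC L := by
  have hm := pvM_append h x
  split
  · next hlt =>
    have hmax : pvM (L ++ [x]) = x := by rw [hm]; simp [hlt]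
    have hnot : x ∉ L := fun hx => absurd (pvM_isMax h x hx) (not_le.mpr hlt)
    unfold pvC
    rw [hmax]
    simp [PySem.List.count, List.count_eq_zero.mpr hnot]
  · next hge =>
    have hmax : pvM (L ++ [x]) = pvM L := by rw [hm]; simp [hge]
    unfold pvC
    rw [hmax]
    by_cases hx : x = pvM L <;> simp [PySem.List.count, hx]

-- one step of B on a populated state, in if-form
lemma pvBStep_some (s m f c x : Int) (ch : Char) :
    pvBStep (s, some (m, f, c)) (x, ch)
      = (pvUpd s ch, some (if m < pvUpd s ch then pvUpd s ch else m,
          if m < pvUpd s ch then x else f,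
          if m < pvUpd s ch then 1 else if pvUpd s ch = m then c + 1 else c)) := by
  simp only [pvBStep, gt_iff_lt]
  split_ifs with h1 h2 <;> simp

-- B's fold invariant: the running (max, first index, count) is correct for the depths seen so far
lemma pvBFold (cs : List Char) : ∀ (s : Int) (P : List Int), P ≠ [] →
    (PySem.List.enumerate cs (P.length : Int)).foldl pvBStep (s, some (pvM P, pvF P, pvC P))
      = (pvLast cs s,
         some (pvM (P ++ pvDepths cs s), pvF (P ++ pvDepths cs s), pvC (P ++ pvDepths cs s))) := by
  induction cs with
  | nil => intro s P _; simp [pvLast, pvDepths]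
  | cons c cs ih =>
    intro s P hP
    rw [PySem.List.enumerate_cons, List.foldl_cons]
    have hstep : pvBStep (s, some (pvM P, pvF P, pvC P)) ((P.length : Int), c)
        = (pvUpd s c, some (pvM (P ++ [pvUpd s c]), pvF (P ++ [pvUpd s c]), pvC (P ++ [pvUpd s c]))) := by
      rw [pvBStep_some, pvF_append hP (pvUpd s c), pvC_append hP (pvUpd s c),
          pvM_append hP (pvUpd s c)]
    rw [hstep]
    have hlen : (P.length : Int) + 1 = ((P ++ [pvUpd s c]).length : Int) := by simp
    rw [hlen, ih (pvUpd s c) (P ++ [pvUpd s c]) (by simp)]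
    simp [pvDepths, pvLast]

lemma pvRange_nil {a b : Int} (h : b ≤ a) : PySem.List.pyRange a b 1 = [] := by
  simp [PySem.List.pyRange, not_lt.mpr h]

-- A's collecting loop over range(a, b) is drop/take
lemma pvCollect (xs : List Char) : ∀ (n a b : Nat) (acc : List Char), b - a = n →
    (PySem.List.pyRange (a : Int) (b : Int) 1).foldl
      (fun acc idx =>
        match PySem.List.pyGet? xs idx with
        | some c => acc ++ [c]
        | none => acc) acc
      = acc ++ (xs.drop a).take (b - a) := by
  intro n
  induction n with
  | zero =>
    intro a b acc hn
    have hba : (b : Int) ≤ (a : Int) := by exact_mod_cast Nat.le_of_sub_eq_zero hn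
    rw [pvRange_nil hba, hn]
    simp
  | succ n ih =>
    intro a b acc hn
    have hab : a < b := by omega
    have hcast : ((a : Int)) < ((b : Nat) : Int) := by exact_mod_cast hab
    rw [PySem.List.pyRange_one_cons hcast, List.foldl_cons]
    have h1 : ((a : Int) + 1) = (((a + 1 : Nat)) : Int) := by push_cast; ring
    rw [PySem.List.pyGet?_natCast]
    have hrec : b - (a + 1) = n := by omega
    cases hx : xs[a]? with
    | none =>
      have hlen : xs.length ≤ a := by
        by_contra hcon
        exact absurd hx (by simp [List.getElem?_eq_getElem (lt_of_not_ge hcon)])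
      simp only [h1]
      rw [ih (a + 1) b acc hrec, hrec]
      rw [List.drop_eq_nil_of_le hlen, List.drop_eq_nil_of_le (le_trans hlen (Nat.le_succ a))]
      simp
    | some c =>
      have hlt : a < xs.length := by
        by_contra hcon
        exact absurd hx (by simp [List.getElem?_eq_none (le_of_not_gt hcon)])
      have hc : xs[a] = c := by
        have := List.getElem?_eq_getElem hlt
        rw [hx] at this; exact (Option.some.injEq _ _).mp this.symm
      simp only [h1]
      rw [ih (a + 1) b (acc ++ [c]) hrec, hrec]
      rw [List.drop_eq_getElem_cons hlt, hc]
      have hba : b - a = n + 1 := hn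
      rw [hba, List.take_succ_cons]
      simp

lemma pvIndex?_eq {L : List Int} (h : L ≠ []) :
    ∃ f : Nat, PySem.List.index? L (pvM L) = some f ∧ (f : Int) = pvF L := by
  have hmem : pvM L ∈ L := pvM_mem h
  have hs := (PySem.List.index?_isSome_iff L (pvM L)).mpr hmem
  cases hidx : PySem.List.index? L (pvM L) with
  | none => rw [hidx] at hs; exact absurd hs (by simp)
  | some f =>
    refine ⟨f, rfl, ?_⟩
    unfold pvF
    rw [hidx]
    simp

-- main equivalence
lemma pvMain (avaldis : String) (h : avaldis.toList ≠ []) :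
    leia_sulgude_siseseim_avaldis avaldis = leia_sulgude_siseseim_avaldis_alt avaldis := by
  cases hchars : avaldis.toList with
  | nil => exact absurd hchars h
  | cons c0 rest =>
    simp only [leia_sulgude_siseseim_avaldis, leia_sulgude_siseseim_avaldis_alt, hchars]
    -- A side: Sid = pvDepths (c0 :: rest) 0
    rw [pvAFold (c0 :: rest) 0 []]
    simp only [List.nil_append]
    have hLne : pvDepths (c0 :: rest) 0 ≠ [] := by simp [pvDepths]
    obtain ⟨f, hf, hfi⟩ := pvIndex?_eq hLne
    rw [pvMax?_eq hLne]
    simp only [hf, Option.getD_some]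
    -- B side: run the invariant from the first character
    have h1 : pvM [pvUpd 0 c0] = pvUpd 0 c0 := by simp [pvM_cons]
    have h2 : pvF [pvUpd 0 c0] = 0 := by
      unfold pvF
      rw [h1, PySem.List.index?_cons_self]
      simp
    have h3 : pvC [pvUpd 0 c0] = 1 := by
      unfold pvC
      rw [h1]
      simp [PySem.List.count]
    have hFold := pvBFold rest (pvUpd 0 c0) [pvUpd 0 c0] (by simp)
    rw [h1, h2, h3] at hFold
    simp only [List.length_cons, List.length_nil] at hFold
    have hdep : [pvUpd 0 c0] ++ pvDepths rest (pvUpd 0 c0) = pvDepths (c0 :: rest) 0 := by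
      simp [pvDepths]
    rw [hdep] at hFold
    have hB : (PySem.List.enumerate (c0 :: rest) 0).foldl pvBStep (0, none)
        = (pvLast rest (pvUpd 0 c0),
           some (pvM (pvDepths (c0 :: rest) 0), pvF (pvDepths (c0 :: rest) 0), pvC (pvDepths (c0 :: rest) 0))) := by
      rw [PySem.List.enumerate_cons, List.foldl_cons]
      have hstep : pvBStep (0, none) (0, c0) = (pvUpd 0 c0, some (pvUpd 0 c0, 0, 1)) := by
        simp [pvBStep]
      rw [hstep]
      norm_num at hFold ⊢
      exact hFold
    rw [hB]
    dsimp only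
    -- both sides are now drop/take
    rw [← hfi]
    have hC : pvC (pvDepths (c0 :: rest) 0)
        = ((PySem.List.count (pvDepths (c0 :: rest) 0) (pvM (pvDepths (c0 :: rest) 0)) : Nat) : Int) := rfl
    rw [hC]
    set cnt : Nat := PySem.List.count (pvDepths (c0 :: rest) 0) (pvM (pvDepths (c0 :: rest) 0)) with hcnt
    have ha : ((f : Int) + 1) = (((f + 1 : Nat)) : Int) := by push_cast; ring
    have hb : ((f : Int) + (cnt : Int)) = (((f + cnt : Nat)) : Int) := by push_cast; ring
    rw [ha, hb, pvCollect (c0 :: rest) (f + cnt - (f + 1)) (f + 1) (f + cnt) [] rfl,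
        PySem.List.slice_natCast]
    have hsub : f + cnt - (f + 1) = cnt - 1 := by omega
    rw [hsub]
    simp

-- ===== VERDICT (by name: the statement is the Claim_ definition above) =====
theorem leia_sulgude_siseseim_avaldis_spec : Claim_equal_leia_sulgude_siseseim_avaldis := by
  intro avaldis _ hpre
  unfold Spec_leia_sulgude_siseseim_avaldis
  exact pvMain avaldis hpre
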